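-- pv_equiv track=rewrite | github.com/PeterWofford/20q-rl-project | data/verify.py | get_best_attribute
-- ===== SOURCE A (Python) =====
-- def get_best_attribute(candidates, available_attributes):
--     """
--     Finds the attribute that splits the candidates most evenly (closest to 50/50).
--     This minimizes the depth of the tree (greedy approximation of optimal).
--     """
--     best_attr = None
--     min_diff = float('inf')
--
--     total_candidates = len(candidates)
--
--     for attr in available_attributes:
--         # Count how many objects have this attribute
--         true_count = sum(1 for obj in candidates if obj['attrs'].get(attr, False))
--         false_count = total_candidates - true_count
--
--         # We want to minimize the difference between the two groups
--         diff = abs(true_count - false_count)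
--
--         # If this split is better, save it
--         if diff < min_diff:
--             min_diff = diff
--             best_attr = attr
--
--     return best_attr
-- ===== SOURCE B (Python) =====
-- def get_best_attribute(candidates, available_attributes):
--     """
--     Finds the attribute that splits the candidates most evenly (closest to 50/50).
--     One counting pass over candidates, then min(key=...) over the attributes
--     (Python's min returns the first minimal element, matching the tie-break).
--     """
--     counts = {}
--     for obj in candidates:
--         for attr, value in obj['attrs'].items():
--             if value:
--                 counts[attr] = counts.get(attr, 0) + 1
--
--     total = len(candidates)
--     if not available_attributes:
--         return None
--     # |true - false| = |2*true - total|
--     return min(available_attributes, key=lambda a: abs(2 * counts.get(a, 0) - total))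
-- ===== Notes on version B (the rewrite author's own statement) =====
-- stated objective: faster
-- what changed: Replaces A's nested scan (a full pass over all candidates for every attribute) and its explicit best_attr/min_diff loop by a single counting pass building a true-count dict over candidates once, followed by one idiomatic min(available_attributes, key=...) call with O(1) lookups; Python's min keeps the first minimal element, preserving A's tie-break.
-- outside the precondition, e.g. on get_best_attribute([{'': {}}], []): A returns None, B raises KeyError
import Mathlib
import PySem

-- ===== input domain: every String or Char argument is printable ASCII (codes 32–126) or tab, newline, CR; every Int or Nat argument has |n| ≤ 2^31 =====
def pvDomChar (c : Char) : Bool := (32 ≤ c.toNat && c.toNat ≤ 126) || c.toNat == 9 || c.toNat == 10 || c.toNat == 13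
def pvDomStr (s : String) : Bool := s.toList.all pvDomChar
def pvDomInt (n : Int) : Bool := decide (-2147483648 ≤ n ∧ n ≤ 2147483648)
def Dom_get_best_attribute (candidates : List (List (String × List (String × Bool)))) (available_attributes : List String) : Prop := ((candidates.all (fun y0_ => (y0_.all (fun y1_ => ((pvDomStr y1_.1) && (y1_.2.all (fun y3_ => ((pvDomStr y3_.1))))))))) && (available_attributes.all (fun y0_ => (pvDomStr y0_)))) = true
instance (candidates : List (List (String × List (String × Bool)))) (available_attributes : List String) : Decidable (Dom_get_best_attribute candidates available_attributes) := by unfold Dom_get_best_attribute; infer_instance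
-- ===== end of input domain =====

-- B replaces A's attribute×candidate nested scan and explicit best/min_diff loop by one
-- counting pass over the candidates plus a min(key=...) over the attributes (objective: faster).

-- ===== PORT A =====
-- obj['attrs'] ; a missing 'attrs' key is a KeyError (get? = none), excluded by Pre_ — the port defaults to [] there
def pvAttrs (obj : List (String × List (String × Bool))) : List (String × Bool) :=
  ((PySem.Dict.mk obj).get? "attrs").getD []

def get_best_attribute (candidates : List (List (String × List (String × Bool)))) (available_attributes : List String) : Option String :=
  -- best_attr = None, min_diff = inf: state (best_attr, min_diff) with none = inf
  let total : Int := candidates.length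
  (available_attributes.foldl
    (fun (st : Option String × Option Int) attr =>
      -- sum(1 for obj in candidates if obj['attrs'].get(attr, False))
      let true_count : Int := ((candidates.filter (fun obj => (PySem.Dict.mk (pvAttrs obj)).getD attr false)).length : Int)
      let false_count : Int := total - true_count
      let diff : Int := |true_count - false_count|
      match st.2 with
      | none => (some attr, some diff)          -- diff < inf
      | some m => if diff < m then (some attr, some diff) else st)
    (none, none)).1

-- ===== PORT B =====
-- the counting pass: for obj in candidates: for attr, value in obj['attrs'].items(): if value: counts[attr] = counts.get(attr, 0) + 1
def pvCounts (candidates : List (List (String × List (String × Bool)))) : PySem.Dict String Int :=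
  candidates.foldl
    (fun d obj =>
      (((PySem.Dict.mk obj).get? "attrs").getD []).foldl
        (fun d p => if p.2 then d.modify p.1 0 (· + 1) else d) d)
    PySem.Dict.empty

def get_best_attribute_alt (candidates : List (List (String × List (String × Bool)))) (available_attributes : List String) : Option String :=
  let counts := pvCounts candidates
  let total : Int := candidates.length
  if available_attributes.isEmpty then none      -- 'if not available_attributes: return None'
  else PySem.List.min? available_attributes (fun a => |2 * counts.getD a 0 - total|)

-- ===== PRECONDITION & SPEC =====
-- Pre_ excludes (1) candidates missing the 'attrs' key: there Python A raises KeyError (except when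
-- available_attributes is empty, where A returns None lazily while B's counting pass raises), and
-- (2) attrs association lists with duplicate keys, which no Python dict can represent.
def Pre_get_best_attribute (candidates : List (List (String × List (String × Bool)))) (available_attributes : List String) : Prop :=
  ∀ obj ∈ candidates,
    (PySem.Dict.mk obj).contains "attrs" = true ∧
    ((((PySem.Dict.mk obj).get? "attrs").getD []).map Prod.fst).Nodup
instance (candidates : List (List (String × List (String × Bool)))) (available_attributes : List String) : Decidable (Pre_get_best_attribute candidates available_attributes) := by unfold Pre_get_best_attribute; infer_instance

def pvWitness_get_best_attribute : (List (List (String × List (String × Bool)))) × List String :=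
  ([[("attrs", [("red", true), ("big", false)])], [("attrs", [("red", false)])]], ["red", "big"])

def Spec_get_best_attribute (candidates : List (List (String × List (String × Bool)))) (available_attributes : List String) (out : Option String) : Prop := out = get_best_attribute_alt candidates available_attributes
instance (candidates : List (List (String × List (String × Bool)))) (available_attributes : List String) (out : Option String) : Decidable (Spec_get_best_attribute candidates available_attributes out) := by unfold Spec_get_best_attribute; infer_instance

-- ===== CLAIM (what is proved, stated in full; the proofs are below) =====
def Claim_equal_get_best_attribute : Prop := ∀ (candidates : List (List (String × List (String × Bool)))) (available_attributes : List String), Dom_get_best_attribute candidates available_attributes → Pre_get_best_attribute candidates available_attributes → Spec_get_best_attribute candidates available_attributes (get_best_attribute candidates available_attributes)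

-- ===== LEMMAS AND PROOFS =====

-- In a duplicate-free attrs list, the number of truthy entries with key `attr`
-- is 1 or 0 according to the dict lookup.
theorem pv_count_pairs (attrs : List (String × Bool)) (attr : String)
    (h : (attrs.map Prod.fst).Nodup) :
    (((attrs.filter (fun p => p.2)).map Prod.fst).count attr : Int)
      = (if (PySem.Dict.mk attrs).getD attr false then 1 else 0) := by
  induction attrs with
  | nil => simp [PySem.Dict.getD_eq_get?_getD, PySem.Dict.get?]
  | cons p rest ih =>
    obtain ⟨k, v⟩ := p
    simp only [List.map_cons, List.nodup_cons] at h
    rw [PySem.Dict.getD_eq_get?_getD, PySem.Dict.get?_mk_cons]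
    by_cases hk : k = attr
    · subst hk
      simp only [beq_self_eq_true, if_true, Option.getD_some]
      have hz : (((rest.filter (fun p => p.2)).map Prod.fst).count k : Int) = 0 := by
        have : k ∉ (rest.filter (fun p => p.2)).map Prod.fst := by
          intro hmem
          exact h.1 (by
            obtain ⟨q, hq, hq1⟩ := List.mem_map.mp hmem
            exact List.mem_map.mpr ⟨q, List.mem_of_mem_filter hq, hq1⟩)
        simp [List.count_eq_zero_of_not_mem this]
      cases v with
      | true => simp [hz]
      | false => simp [hz]
    · have hbeq : (k == attr) = false := beq_false_of_ne hk
      rw [hbeq]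
      simp only [Bool.false_eq_true, if_false]
      rw [← PySem.Dict.getD_eq_get?_getD, ← ih h.2]
      cases v with
      | true => simp [hk]
      | false => simp

-- One object's inner counting loop adds its indicator to the running dict entry.
theorem pv_inner_getD (attrs : List (String × Bool)) (d : PySem.Dict String Int) (attr : String)
    (h : (attrs.map Prod.fst).Nodup) :
    ((attrs.foldl (fun d p => if p.2 then d.modify p.1 0 (· + 1) else d) d).getD attr 0)
      = d.getD attr 0 + (if (PySem.Dict.mk attrs).getD attr false then 1 else 0) := by
  rw [PySem.List.foldl_if_eq_foldl_filter]
  rw [show ((attrs.filter (fun p => p.2)).foldl (fun d p => d.modify p.1 0 (· + 1)) d)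
        = (((attrs.filter (fun p => p.2)).map Prod.fst).foldl (fun d x => d.modify x 0 (· + 1)) d) by
      rw [List.foldl_map]]
  rw [PySem.Dict.getD_foldl_modify_add_one, pv_count_pairs attrs attr h]

-- The whole counting pass: the dict entry for `attr` is A's per-attribute count.
theorem pv_counts_getD (candidates : List (List (String × List (String × Bool)))) (attr : String)
    (h : ∀ obj ∈ candidates, (((PySem.Dict.mk obj).get? "attrs").getD []).map Prod.fst |>.Nodup) :
    (pvCounts candidates).getD attr 0
      = ((candidates.filter (fun obj => (PySem.Dict.mk (pvAttrs obj)).getD attr false)).length : Int) := by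
  have gen : ∀ (cs : List (List (String × List (String × Bool)))) (d : PySem.Dict String Int),
      (∀ obj ∈ cs, (((PySem.Dict.mk obj).get? "attrs").getD []).map Prod.fst |>.Nodup) →
      ((cs.foldl (fun d obj => (((PySem.Dict.mk obj).get? "attrs").getD []).foldl
          (fun d p => if p.2 then d.modify p.1 0 (· + 1) else d) d) d).getD attr 0)
        = d.getD attr 0 + ((cs.filter (fun obj => (PySem.Dict.mk (pvAttrs obj)).getD attr false)).length : Int) := by
    intro cs
    induction cs with
    | nil => intro d _; simp
    | cons obj rest ih =>
      intro d hnd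
      simp only [List.foldl_cons]
      have hobj : ((pvAttrs obj).map Prod.fst).Nodup := hnd obj (List.mem_cons_self)
      rw [ih _ (fun o ho => hnd o (List.mem_cons_of_mem _ ho)),
          pv_inner_getD (((PySem.Dict.mk obj).get? "attrs").getD []) d attr hobj]
      simp only [List.filter_cons, pvAttrs]
      split_ifs with hcase
      · simp only [List.length_cons]; push_cast; ring
      · simp
  rw [pvCounts, gen candidates PySem.Dict.empty h]
  simp

-- A's best_attr/min_diff loop, started with a current best b, equals Python min() over b::l.
theorem pv_fold_min (f : String → Int) (l : List String) :
    ∀ (b : String),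
    (l.foldl
        (fun (st : Option String × Option Int) attr =>
          match st.2 with
          | none => (some attr, some (f attr))
          | some m => if f attr < m then (some attr, some (f attr)) else st)
        (some b, some (f b))).1
      = PySem.List.min? (b :: l) f := by
  induction l with
  | nil => intro b; simp [PySem.List.min?]
  | cons a t ih =>
    intro b
    simp only [PySem.List.min?, List.foldl_cons] at ih ⊢
    by_cases hlt : f a < f b
    · simpa [hlt] using ih a
    · simpa [hlt] using ih b

-- ===== VERDICT (by name: the statement is the Claim_ definition above) =====
theorem get_best_attribute_spec : Claim_equal_get_best_attribute := by
  intro candidates available_attributes _hdom hpre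
  unfold Spec_get_best_attribute get_best_attribute get_best_attribute_alt
  dsimp only
  have hkey : (fun a => |2 * (pvCounts candidates).getD a 0 - (candidates.length : Int)|)
      = fun a => |((candidates.filter (fun obj => (PySem.Dict.mk (pvAttrs obj)).getD a false)).length : Int)
          - ((candidates.length : Int)
             - ((candidates.filter (fun obj => (PySem.Dict.mk (pvAttrs obj)).getD a false)).length : Int))| := by
    funext a
    rw [pv_counts_getD candidates a (fun obj hm => (hpre obj hm).2)]
    congr 1
    ring
  rw [hkey]
  cases available_attributes with
  | nil => rfl
  | cons a t =>
    simp only [List.isEmpty_cons, Bool.false_eq_true, if_false]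
    simp only [List.foldl_cons]
    exact pv_fold_min _ t a
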